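-- pv_equiv track=rewrite | github.com/1deterministic/Simple-Logical-Expression-Analyzer | slea/slea.py | get_not_substring
-- ===== SOURCE A (Python) =====
-- logical_and = "&"
--
-- logical_or = "|"
--
-- logical_not = "!"
--
-- stack_in = "("
--
-- stack_out = ")"
--
-- def get_not_substring(expr):
--     expr = expr.replace(" ", "")
--
--     out = []
--
--     i = 0
--     stack_level = 0
--     while True:
--         # if the expression already ended
--         if i >= len(expr):
--             # the substring affected is the entire string
--             return i, expr
--             break
--
--         # if entering a stack
--         elif expr[i] == stack_in:
--             stack_level += 1
--
--         # if exiting a stack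
--         elif expr[i] == stack_out:
--             stack_level -= 1
--
--         # if there is no (more) stack
--         if stack_level == 0:
--             # if there was found an operator character
--             if expr[i] == logical_and or expr[i] == logical_or:
--                 # returns all the string until this point
--                 return i, expr[:i]
--
--             # if another not was found
--             elif expr[i] == logical_not:
--                 # ignore the second one (only the first logical not is considered)
--                 # hopefully is covered by the syntax analyzer
--                 return get_not_substring(expr[i + 1:])
--
--         i += 1
--
--     return out
-- ===== SOURCE B (Python) =====
-- logical_and = "&"
-- logical_or = "|"
-- logical_not = "!"
-- stack_in = "("
-- stack_out = ")"
--
-- def get_not_substring(expr):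
--     # staged passes: precompute the depth profile, then locate the first
--     # top-level operator (end) and the last top-level NOT before it (start)
--     expr = expr.replace(" ", "")
--     depths = []
--     depth = 0
--     for c in expr:
--         if c == stack_in:
--             depth += 1
--         elif c == stack_out:
--             depth -= 1
--         depths.append(depth)
--     end = len(expr)
--     for i, c in enumerate(expr):
--         if depths[i] == 0 and (c == logical_and or c == logical_or):
--             end = i
--             break
--     start = 0
--     for i in range(end):
--         if depths[i] == 0 and expr[i] == logical_not:
--             start = i + 1
--     return end - start, expr[start:end]
-- ===== Notes on version B (the rewrite author's own statement) =====
-- stated objective: alternative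
-- what changed: Replaced A's recursive restart-on-NOT scan with three staged passes: precompute the paren-depth profile, find the first top-level operator (end), then the last top-level NOT before it (start), and slice once.
import Mathlib
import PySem

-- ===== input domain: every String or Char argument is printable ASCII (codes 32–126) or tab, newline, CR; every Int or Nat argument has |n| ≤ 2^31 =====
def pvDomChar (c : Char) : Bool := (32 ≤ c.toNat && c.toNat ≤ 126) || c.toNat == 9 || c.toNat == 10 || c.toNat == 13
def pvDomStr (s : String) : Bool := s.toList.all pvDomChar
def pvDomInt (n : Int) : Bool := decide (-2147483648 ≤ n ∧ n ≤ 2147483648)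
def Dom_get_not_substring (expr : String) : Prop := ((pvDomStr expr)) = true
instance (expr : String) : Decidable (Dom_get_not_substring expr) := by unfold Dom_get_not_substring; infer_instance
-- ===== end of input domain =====

-- B replaces A's recursive restart-on-NOT scan by three staged passes over a precomputed depth profile (alternative decomposition, same values).

-- ===== PORT A =====
-- A's `while True` loop with the recursion on expr[i+1:]; i, stack_level are the loop state.
-- fuel is only a structural totality guard: fuel = len+1 always suffices (i grows or the list shrinks), the 0 case is unreachable.
def gnsA (fuel : Nat) (expr : List Char) (i : Nat) (level : Int) : Int × String :=
  match fuel with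
  | 0 => ((i : Int), String.ofList expr)
  | fuel + 1 =>
    if _h : i ≥ expr.length then
      ((i : Int), String.ofList expr)
    else
      let c := expr[i]
      let level := if c = '(' then level + 1 else if c = ')' then level - 1 else level
      if level = 0 then
        if c = '&' ∨ c = '|' then ((i : Int), String.ofList (expr.take i))  -- expr[:i]
        else if c = '!' then gnsA fuel (expr.drop (i + 1)) 0 0              -- get_not_substring(expr[i+1:]) (tail already space-free)
        else gnsA fuel expr (i + 1) level
      else gnsA fuel expr (i + 1) level

def get_not_substring (expr : String) : Int × String :=
  let e := (PySem.Str.replace expr " " "").toList   -- expr.replace(" ", "")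
  gnsA (e.length + 1) e 0 0

-- ===== PORT B =====
-- pass 1: the depth-after-each-char profile (`for c in expr: depth += ...; depths.append(depth)`)
def gnsDepths (d : Int) : List Char → List Int
  | [] => []
  | c :: rest =>
      let d' := if c = '(' then d + 1 else if c = ')' then d - 1 else d
      d' :: gnsDepths d' rest

-- pass 2: first index at top level carrying '&'/'|', defaulting to len (the for/break loop)
def gnsEnd (depths : List Int) : List Char → Nat → Nat
  | [], i => i
  | c :: rest, i =>
      if depths.getD i 0 = 0 ∧ (c = '&' ∨ c = '|') then i else gnsEnd depths rest (i + 1)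

-- pass 3: `start = i+1` for every top-level '!' before end (the range(end) loop); indices < end < len, so getD is exact
def gnsStart (e : List Char) (depths : List Int) (endi : Nat) : Nat :=
  (List.range endi).foldl
    (fun start i => if depths.getD i 0 = 0 ∧ e.getD i ' ' = '!' then i + 1 else start) 0

def get_not_substring_alt (expr : String) : Int × String :=
  let e := (PySem.Str.replace expr " " "").toList
  let depths := gnsDepths 0 e
  let endi := gnsEnd depths e 0
  let start := gnsStart e depths endi
  -- expr[start:end] with 0 ≤ start ≤ end ≤ len, where the slice is exactly take-then-drop
  ((endi : Int) - (start : Int), String.ofList ((e.take endi).drop start))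

-- ===== PRECONDITION & SPEC =====
def Spec_get_not_substring (expr : String) (out : Int × String) : Prop := out = get_not_substring_alt expr
instance (expr : String) (out : Int × String) : Decidable (Spec_get_not_substring expr out) := by unfold Spec_get_not_substring; infer_instance

-- ===== CLAIM (what is proved, stated in full; the proofs are below) =====
def Claim_equal_get_not_substring : Prop := ∀ (expr : String), Dom_get_not_substring expr → Spec_get_not_substring expr (get_not_substring expr)

-- ===== LEMMAS AND PROOFS =====

-- Proof-only bridge: A's recursion flattened into one scan carrying a running start offset.
def gnsB (fuel : Nat) (expr : List Char) (i start : Nat) (level : Int) : Int × String :=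
  match fuel with
  | 0 => ((i : Int) - (start : Int), String.ofList (expr.drop start))
  | fuel + 1 =>
    if _h : i < expr.length then
      let c := expr[i]
      let level := if c = '(' then level + 1 else if c = ')' then level - 1 else level
      if level = 0 then
        if c = '&' ∨ c = '|' then
          ((i : Int) - (start : Int), String.ofList ((expr.take i).drop start))
        else if c = '!' then gnsB fuel expr (i + 1) (i + 1) level
        else gnsB fuel expr (i + 1) start level
      else gnsB fuel expr (i + 1) start level
    else ((i : Int) - (start : Int), String.ofList (expr.drop start))

-- B at absolute index s+i with offset s equals A restarted on the suffix expr.drop s at index i (the same fuel serves both).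
theorem gnsB_eq_gnsA_aux (expr : List Char) :
    ∀ fuel s i (level : Int), expr.length - (s + i) < fuel →
      gnsB fuel expr (s + i) s level = gnsA fuel (expr.drop s) i level := by
  intro fuel
  induction fuel with
  | zero => intro s i level h; omega
  | succ fuel ih =>
    intro s i level h
    rw [gnsB, gnsA]
    have hlen : (expr.drop s).length = expr.length - s := List.length_drop ..
    by_cases hin : s + i < expr.length
    · rw [dif_pos hin, dif_neg (by omega)]
      have hget : (expr.drop s)[i]'(by omega) = expr[s + i]'(hin) := by
        simp [List.getElem_drop]
      simp only [hget]
      set c := expr[s + i]'(hin) with hc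
      set level' := if c = '(' then level + 1 else if c = ')' then level - 1 else level with hl
      by_cases h0 : level' = 0
      · rw [if_pos h0, if_pos h0]
        by_cases hop : c = '&' ∨ c = '|'
        · rw [if_pos hop, if_pos hop, Prod.mk.injEq]
          refine ⟨by push_cast; ring, ?_⟩
          rw [List.drop_take, Nat.add_sub_cancel_left]
        · rw [if_neg hop, if_neg hop]
          by_cases hnot : c = '!'
          · rw [if_pos hnot, if_pos hnot, h0]
            have := ih (s + i + 1) 0 0 (by omega)
            simpa [List.drop_drop, Nat.add_comm, Nat.add_assoc, Nat.add_left_comm] using this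
          · rw [if_neg hnot, if_neg hnot]
            have := ih s (i + 1) level' (by omega)
            rw [← Nat.add_assoc] at this
            exact this
      · rw [if_neg h0, if_neg h0]
        have := ih s (i + 1) level' (by omega)
        rw [← Nat.add_assoc] at this
        exact this
    · rw [dif_neg (by omega), dif_pos (by omega)]
      simp

-- the depth step and prefix-depth function
def dStep (d : Int) (c : Char) : Int := if c = '(' then d + 1 else if c = ')' then d - 1 else d

def pDepth (e : List Char) (i : Nat) : Int := (e.take i).foldl dStep 0

theorem pDepth_succ (e : List Char) (i : Nat) (h : i < e.length) :
    pDepth e (i + 1) = dStep (pDepth e i) e[i] := by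
  unfold pDepth
  rw [List.take_add_one, List.getElem?_eq_getElem h]
  rw [Option.toList_some, List.foldl_append, List.foldl_cons, List.foldl_nil]

theorem gnsDepths_getD (e : List Char) :
    ∀ i d, i < e.length → (gnsDepths d e).getD i 0 = (e.take (i + 1)).foldl dStep d := by
  induction e with
  | nil => intro i d h; simp at h
  | cons c rest ih =>
    intro i d h
    cases i with
    | zero => simp [gnsDepths, dStep]
    | succ i =>
      simp only [gnsDepths, List.getD_cons_succ, List.take_succ_cons, List.foldl_cons]
      exact ih i (dStep d c) (by simpa using h)

theorem depths_getD (e : List Char) (i : Nat) (h : i < e.length) :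
    (gnsDepths 0 e).getD i 0 = pDepth e (i + 1) := gnsDepths_getD e i 0 h

-- abbreviations for the two located indices, scanning from position i
def eFrom (e : List Char) (i : Nat) : Nat := gnsEnd (gnsDepths 0 e) (e.drop i) i

def sFrom (e : List Char) (i start : Nat) : Nat :=
  (List.range' i (eFrom e i - i)).foldl
    (fun s j => if (gnsDepths 0 e).getD j 0 = 0 ∧ e.getD j ' ' = '!' then j + 1 else s) start

theorem gnsEnd_ge (depths : List Int) : ∀ (l : List Char) i, i ≤ gnsEnd depths l i := by
  intro l
  induction l with
  | nil => intro i; simp [gnsEnd]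
  | cons c rest ih =>
    intro i
    unfold gnsEnd
    split
    · exact le_rfl
    · exact le_trans (Nat.le_succ i) (ih (i + 1))

theorem drop_cons_of_lt (e : List Char) (i : Nat) (h : i < e.length) :
    e.drop i = e[i] :: e.drop (i + 1) := (List.drop_eq_getElem_cons h)

theorem gnsB_succ (fuel : Nat) (e : List Char) (i start : Nat) (level : Int)
    (h : i < e.length) :
    gnsB (fuel + 1) e i start level =
      (if dStep level e[i] = 0 then
        if e[i] = '&' ∨ e[i] = '|' then
          ((i : Int) - (start : Int), String.ofList ((e.take i).drop start))
        else if e[i] = '!' then gnsB fuel e (i + 1) (i + 1) (dStep level e[i])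
        else gnsB fuel e (i + 1) start (dStep level e[i])
      else gnsB fuel e (i + 1) start (dStep level e[i])) := by
  rw [gnsB, dif_pos h]
  rfl

theorem gnsB_stop (fuel : Nat) (e : List Char) (i start : Nat) (level : Int)
    (h : ¬ i < e.length) :
    gnsB (fuel + 1) e i start level
      = ((i : Int) - (start : Int), String.ofList (e.drop start)) := by
  rw [gnsB, dif_neg h]

theorem gnsEnd_cons (depths : List Int) (c : Char) (rest : List Char) (i : Nat) :
    gnsEnd depths (c :: rest) i
      = if depths.getD i 0 = 0 ∧ (c = '&' ∨ c = '|') then i else gnsEnd depths rest (i + 1) := rfl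

-- the main invariant: the flattened scan equals the staged-pass result
theorem gnsB_closed (e : List Char) :
    ∀ fuel i start (level : Int), e.length - i < fuel → i ≤ e.length → level = pDepth e i →
      gnsB fuel e i start level =
        ((eFrom e i : Int) - (sFrom e i start : Int),
          String.ofList ((e.take (eFrom e i)).drop (sFrom e i start))) := by
  intro fuel
  induction fuel with
  | zero => intro i start level h _ _; omega
  | succ fuel ih =>
    intro i start level hfuel hle hlev
    by_cases hin : i < e.length
    · rw [gnsB_succ fuel e i start level hin]
      set c := e[i] with hc
      have hstep : dStep level c = pDepth e (i + 1) := by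
        rw [pDepth_succ e i hin, hlev]
      have hdcons : e.drop i = c :: e.drop (i + 1) := drop_cons_of_lt e i hin
      have hgetD : e.getD i ' ' = c := List.getD_eq_getElem e ' ' hin
      have hdep : (gnsDepths 0 e).getD i 0 = pDepth e (i + 1) := depths_getD e i hin
      rw [hstep]
      by_cases h0 : pDepth e (i + 1) = 0
      · rw [if_pos h0]
        by_cases hop : c = '&' ∨ c = '|'
        · rw [if_pos hop]
          have hE : eFrom e i = i := by
            unfold eFrom
            rw [hdcons, gnsEnd_cons, if_pos ⟨by rw [hdep]; exact h0, hop⟩]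
          have hS : sFrom e i start = start := by
            unfold sFrom
            rw [hE]
            simp
          rw [hE, hS]
        · rw [if_neg hop]
          have hEeq : eFrom e i = eFrom e (i + 1) := by
            unfold eFrom
            rw [hdcons, gnsEnd_cons, if_neg (by rintro ⟨-, h⟩; exact hop h)]
          have hEge : i + 1 ≤ eFrom e (i + 1) := gnsEnd_ge _ _ _
          have hrange : List.range' i (eFrom e i - i)
              = i :: List.range' (i + 1) (eFrom e (i + 1) - (i + 1)) := by
            rw [hEeq]
            have h1 : eFrom e (i + 1) - i = (eFrom e (i + 1) - (i + 1)) + 1 := by omega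
            rw [h1, List.range'_succ]
          by_cases hnot : c = '!'
          · rw [if_pos hnot]
            have hS : sFrom e i start = sFrom e (i + 1) (i + 1) := by
              unfold sFrom
              rw [hrange, List.foldl_cons,
                if_pos ⟨by rw [hdep]; exact h0, by rw [hgetD]; exact hnot⟩]
            rw [ih (i + 1) (i + 1) _ (by omega) (by omega) rfl, ← hEeq, ← hS]
          · rw [if_neg hnot]
            have hS : sFrom e i start = sFrom e (i + 1) start := by
              unfold sFrom
              rw [hrange, List.foldl_cons,
                if_neg (by rintro ⟨-, h⟩; rw [hgetD] at h; exact hnot h)]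
            rw [ih (i + 1) start _ (by omega) (by omega) rfl, ← hEeq, ← hS]
      · rw [if_neg h0]
        have hEeq : eFrom e i = eFrom e (i + 1) := by
          unfold eFrom
          rw [hdcons, gnsEnd_cons, if_neg (by rintro ⟨h, -⟩; rw [hdep] at h; exact h0 h)]
        have hEge : i + 1 ≤ eFrom e (i + 1) := gnsEnd_ge _ _ _
        have hrange : List.range' i (eFrom e i - i)
            = i :: List.range' (i + 1) (eFrom e (i + 1) - (i + 1)) := by
          rw [hEeq]
          have h1 : eFrom e (i + 1) - i = (eFrom e (i + 1) - (i + 1)) + 1 := by omega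
          rw [h1, List.range'_succ]
        have hS : sFrom e i start = sFrom e (i + 1) start := by
          unfold sFrom
          rw [hrange, List.foldl_cons,
            if_neg (by rintro ⟨h, -⟩; rw [hdep] at h; exact h0 h)]
        rw [ih (i + 1) start _ (by omega) (by omega) rfl, ← hEeq, ← hS]
    · rw [gnsB_stop fuel e i start level hin]
      have hi : i = e.length := by omega
      have hE : eFrom e i = i := by
        unfold eFrom
        rw [hi, List.drop_length]
        rfl
      have hS : sFrom e i start = start := by
        unfold sFrom
        rw [hE]
        simp
      rw [hE, hS, hi, List.take_length]

-- ===== VERDICT (by name: the statement is the Claim_ definition above) =====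
theorem get_not_substring_spec : Claim_equal_get_not_substring := by
  intro expr _
  unfold Spec_get_not_substring
  set e := (PySem.Str.replace expr " " "").toList with he
  have h1 : get_not_substring expr = gnsA (e.length + 1) e 0 0 := rfl
  have h2 : get_not_substring_alt expr =
      ((gnsEnd (gnsDepths 0 e) e 0 : Int)
          - (gnsStart e (gnsDepths 0 e) (gnsEnd (gnsDepths 0 e) e 0) : Int),
        String.ofList ((e.take (gnsEnd (gnsDepths 0 e) e 0)).drop
          (gnsStart e (gnsDepths 0 e) (gnsEnd (gnsDepths 0 e) e 0)))) := rfl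
  have hAB := gnsB_eq_gnsA_aux e (e.length + 1) 0 0 0 (by omega)
  simp only [Nat.add_zero, List.drop_zero] at hAB
  have hE0 : eFrom e 0 = gnsEnd (gnsDepths 0 e) e 0 := by
    unfold eFrom; rw [List.drop_zero]
  have hS0 : gnsStart e (gnsDepths 0 e) (gnsEnd (gnsDepths 0 e) e 0) = sFrom e 0 0 := by
    unfold gnsStart sFrom
    rw [hE0, Nat.sub_zero, List.range_eq_range']
  rw [h1, h2, ← hAB,
    gnsB_closed e (e.length + 1) 0 0 0 (by omega) (by omega) (by simp [pDepth]),
    hE0, hS0]
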